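-- pv_equiv track=rewrite | github.com/Se-cloudy/LeetcodeLearn | 每日一题/20231011_中等_哈希列表_1h.py | count
-- ===== SOURCE A (Python) =====
-- positive_feedback = ["smart", "brilliant", "studious"]
--
-- negative_feedback = ["not"]
--
-- def count(words: str) -> int:
--     ls = words.split(' ')
--     cc = 0
--     for i in ls:
--         if i in positive_feedback:
--             cc += 3
--         elif i in negative_feedback:
--             cc -= 1
--     return cc
-- ===== SOURCE B (Python) =====
-- positive_feedback = ["smart", "brilliant", "studious"]
--
-- negative_feedback = ["not"]
--
-- def count(words: str) -> int:
--     cnt = {}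
--     for w in words.split(' '):
--         cnt[w] = cnt.get(w, 0) + 1
--     return 3 * sum(cnt.get(w, 0) for w in positive_feedback) \
--              - sum(cnt.get(w, 0) for w in negative_feedback)
-- ===== Notes on version B (the rewrite author's own statement) =====
-- stated objective: idiomatic
-- what changed: B builds a word-frequency table in one pass and then scores by iterating over the two fixed feedback lists with table lookups, instead of scanning each input word and testing membership in the feedback lists.
import Mathlib
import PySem

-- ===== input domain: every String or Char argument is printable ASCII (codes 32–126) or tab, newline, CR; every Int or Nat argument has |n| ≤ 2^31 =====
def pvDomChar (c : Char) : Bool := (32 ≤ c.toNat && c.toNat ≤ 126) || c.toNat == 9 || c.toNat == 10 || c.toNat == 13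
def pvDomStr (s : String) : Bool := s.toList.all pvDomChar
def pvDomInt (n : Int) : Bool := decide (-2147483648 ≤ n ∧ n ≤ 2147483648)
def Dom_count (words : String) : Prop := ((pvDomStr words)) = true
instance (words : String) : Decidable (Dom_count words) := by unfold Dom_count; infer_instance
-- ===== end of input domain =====

-- B replaces A's per-word membership scan by a one-pass frequency table scored
-- over the two fixed feedback lists (idiomatic Counter-style formulation).

-- ===== PORT A =====
-- s.split(sep): exact for sep ≠ "" (split? is none only for sep = ""; here sep is always " ")
def pySplit (s sep : String) : List String := (PySem.Str.split? s sep).getD []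

def positive_feedback : List String := ["smart", "brilliant", "studious"]

def negative_feedback : List String := ["not"]

def count (words : String) : Int :=
  let ls := pySplit words " "
  ls.foldl (fun cc i =>
    if i ∈ positive_feedback then cc + 3
    else if i ∈ negative_feedback then cc - 1
    else cc) 0

-- ===== PORT B =====
def count_alt (words : String) : Int :=
  let cnt : PySem.Dict String Int :=
    (pySplit words " ").foldl
      (fun d w => d.insert w (d.getD w 0 + 1)) PySem.Dict.empty
  3 * (positive_feedback.foldl (fun s w => s + cnt.getD w 0) 0)
    - (negative_feedback.foldl (fun s w => s + cnt.getD w 0) 0)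

-- ===== PRECONDITION & SPEC =====
def Spec_count (words : String) (out : Int) : Prop := out = count_alt words
instance (words : String) (out : Int) : Decidable (Spec_count words out) := by unfold Spec_count; infer_instance

-- ===== CLAIM (what is proved, stated in full; the proofs are below) =====
def Claim_equal_count : Prop := ∀ (words : String), Dom_count words → Spec_count words (count words)

-- ===== LEMMAS AND PROOFS =====

theorem count_foldl_eq (ls : List String) (cc : Int) :
    ls.foldl (fun cc i =>
      if i ∈ positive_feedback then cc + 3
      else if i ∈ negative_feedback then cc - 1
      else cc) cc
    = cc + 3 * ((ls.count "smart" : Int) + ls.count "brilliant" + ls.count "studious")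
        - ls.count "not" := by
  induction ls generalizing cc with
  | nil => simp
  | cons a tl ih =>
    simp only [List.foldl_cons]
    rw [ih]
    simp only [List.count_cons, positive_feedback, negative_feedback,
      List.mem_cons, List.not_mem_nil, or_false]
    by_cases h1 : a = "smart" <;> by_cases h2 : a = "brilliant" <;>
      by_cases h3 : a = "studious" <;> by_cases h4 : a = "not" <;>
      simp_all <;> push_cast <;> ring

theorem count_eq_counts (words : String) :
    count words
    = 3 * (((pySplit words " ").count "smart" : Int)
            + (pySplit words " ").count "brilliant"
            + (pySplit words " ").count "studious")
        - (pySplit words " ").count "not" := by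
  simp [count, count_foldl_eq]

theorem count_alt_eq_counts (words : String) :
    count_alt words
    = 3 * (((pySplit words " ").count "smart" : Int)
            + (pySplit words " ").count "brilliant"
            + (pySplit words " ").count "studious")
        - (pySplit words " ").count "not" := by
  simp only [count_alt, PySem.Dict.foldl_insert_getD_add_one_eq_counter, positive_feedback,
    negative_feedback, List.foldl_cons, List.foldl_nil, PySem.Dict.getD_counter]
  ring

-- ===== VERDICT (by name: the statement is the Claim_ definition above) =====
theorem count_spec : Claim_equal_count := by
  intro words _
  unfold Spec_count
  rw [count_eq_counts, count_alt_eq_counts]
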